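-- pv_equiv track=rewrite | github.com/jmmiddour/CSPT19 | GCA_practice/MutateTheArray.py | mutateTheArray
-- ===== SOURCE A (Python) =====
-- def mutateTheArray(n, a):
-- 	b = [0] * n  # list of 0's the length of n
--
-- 	if n < 2:  # If there is only one element in array `a`
-- 		return a  # Just return array `a`
--
-- 	else:  # If there are 2 or more elements in array `a`
-- 		b[0] = a[0] + a[1]  # `b` at the first index, only add first 2
-- 		# elements from array `a`
-- 		b[-1] = a[-2] + a[-1]  # `b` at last index, only add the last 2
-- 		# elements from array `a`
--
-- 		for i in range(1, len(b) - 1):  # Iterate through the rest of the list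
-- 			b[i] = a[i - 1] + a[i] + a[i + 1]  # add `i` plus surrounding
-- 		# elements together from array `a`
--
-- 	return b  # Returns the mutated array `b`
-- ===== SOURCE B (Python) =====
-- def mutateTheArray(n, a):
--     # Fewer than two elements: nothing to sum with a neighbor.
--     if n < 2:
--         return a
--     # Stage 1: prefix sums of a (p[j] = sum of the first j elements).
--     p = [0]
--     for x in a:
--         p.append(p[-1] + x)
--     # Stage 2: each window sum is a difference of two prefix sums.
--     b = [p[i + 2] - p[max(i - 1, 0)] for i in range(n - 1)]
--     b.append(a[-2] + a[-1])
--     return b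
-- ===== Notes on version B (the rewrite author's own statement) =====
-- stated objective: alternative
-- what changed: Replaced A's direct neighbor additions (explicit boundary assignments plus an indexed interior loop writing into a zero buffer) by a two-stage prefix-sum algorithm: build the cumulative-sum array p once, then read every window sum off as a difference p[i+2] - p[max(i-1,0)].
import Mathlib
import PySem

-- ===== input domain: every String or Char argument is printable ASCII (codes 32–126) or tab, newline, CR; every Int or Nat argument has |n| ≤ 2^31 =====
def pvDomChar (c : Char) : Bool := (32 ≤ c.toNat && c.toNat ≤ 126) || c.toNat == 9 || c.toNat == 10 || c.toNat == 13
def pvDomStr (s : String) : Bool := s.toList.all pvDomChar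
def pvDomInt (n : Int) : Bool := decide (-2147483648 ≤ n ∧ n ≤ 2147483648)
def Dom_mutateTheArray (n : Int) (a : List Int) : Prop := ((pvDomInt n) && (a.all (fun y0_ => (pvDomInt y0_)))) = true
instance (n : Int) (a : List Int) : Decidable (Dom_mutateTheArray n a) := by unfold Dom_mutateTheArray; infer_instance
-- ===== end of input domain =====

-- B replaces A's direct neighbor additions (zero buffer, boundary writes, indexed interior loop)
-- by a two-stage prefix-sum algorithm: cumulative sums p, then window sums as differences
-- p[i+2] - p[max(i-1,0)] (objective: alternative; same O(n) cost).


-- ===== PORT A =====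
def mutateTheArray (n : Int) (a : List Int) : List Int :=
  let b := List.replicate n.toNat 0        -- b = [0] * n
  if n < 2 then a
  else
    let b := PySem.List.pySetD b 0 (PySem.List.pyGetD a 0 0 + PySem.List.pyGetD a 1 0)
    let b := PySem.List.pySetD b (-1) (PySem.List.pyGetD a (-2) 0 + PySem.List.pyGetD a (-1) 0)
    (PySem.List.pyRange 1 ((b.length : Int) - 1) 1).foldl
      (fun b i => PySem.List.pySetD b i
        (PySem.List.pyGetD a (i - 1) 0 + PySem.List.pyGetD a i 0 + PySem.List.pyGetD a (i + 1) 0)) b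
    -- pyGetD/pySetD are the total forms of Python's indexing; exact on Pre_ (all indices in range)

-- ===== PORT B =====
def mutateTheArray_alt (n : Int) (a : List Int) : List Int :=
  if n < 2 then a
  else
    -- stage 1: prefix sums (p.append(p[-1] + x))
    let p := a.foldl (fun p x => p ++ [PySem.List.pyGetD p (-1) 0 + x]) [0]
    -- stage 2: window sums as prefix-sum differences
    let b := (PySem.List.pyRange 0 (n - 1) 1).map
      (fun i => PySem.List.pyGetD p (i + 2) 0 - PySem.List.pyGetD p (max (i - 1) 0) 0)
    b ++ [PySem.List.pyGetD a (-2) 0 + PySem.List.pyGetD a (-1) 0]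
    -- pyGetD is the total form of Python's indexing; exact on Pre_ (all indices in range)

-- ===== PRECONDITION & SPEC =====
-- Pre_ is exactly where the Python A returns normally: n < 2 (early return), or 2 ≤ n ≤ len(a)
-- (for n ≥ 2 and len(a) < n A raises IndexError on a[1] or a[i+1]).
def Pre_mutateTheArray (n : Int) (a : List Int) : Prop := n < 2 ∨ (2 ≤ n ∧ n ≤ (a.length : Int))
instance (n : Int) (a : List Int) : Decidable (Pre_mutateTheArray n a) := by unfold Pre_mutateTheArray; infer_instance
def pvWitness_mutateTheArray : Int × List Int := (3, [1, 2, 3])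

def Spec_mutateTheArray (n : Int) (a : List Int) (out : List Int) : Prop := out = mutateTheArray_alt n a
instance (n : Int) (a : List Int) (out : List Int) : Decidable (Spec_mutateTheArray n a out) := by unfold Spec_mutateTheArray; infer_instance

-- ===== CLAIM (what is proved, stated in full; the proofs are below) =====
def Claim_equal_mutateTheArray : Prop := ∀ (n : Int) (a : List Int), Dom_mutateTheArray n a → Pre_mutateTheArray n a → Spec_mutateTheArray n a (mutateTheArray n a)

-- ===== LEMMAS AND PROOFS =====

-- p[-1] of a nonempty-by-construction buffer acc ++ [s] is s.
theorem pyGetD_append_last (xs : List Int) (s : Int) :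
    PySem.List.pyGetD (xs ++ [s]) (-1) 0 = s := by
  simp [PySem.List.pyGetD, PySem.List.pyGet?, PySem.List.pyIdx?]

-- Stage-1 characterization: the prefix-sum foldl appends s + (take j).sum for each j.
theorem prefix_foldl (a : List Int) (acc : List Int) (s : Int) :
    a.foldl (fun p x => p ++ [PySem.List.pyGetD p (-1) 0 + x]) (acc ++ [s]) =
      acc ++ (List.range (a.length + 1)).map (fun j => s + (a.take j).sum) := by
  induction a generalizing acc s with
  | nil => simp
  | cons x t ih =>
    simp only [List.foldl_cons, pyGetD_append_last]
    rw [List.append_assoc, ← List.append_assoc acc [s] [s + x], ih (acc ++ [s]) (s + x),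
        List.append_assoc]
    congr 1
    rw [List.length_cons, List.range_succ_eq_map (n := t.length + 1), List.map_cons, List.map_map]
    simp only [List.take_zero, List.sum_nil, add_zero, List.singleton_append]
    congr 1
    apply List.map_congr_left
    intro j _
    simp [List.take_succ_cons, add_assoc]

-- p[k] (k ≤ len a) is the sum of the first k elements of a.
theorem p_getD (a : List Int) (k : Nat) (hk : k ≤ a.length) :
    PySem.List.pyGetD
      (a.foldl (fun p x => p ++ [PySem.List.pyGetD p (-1) 0 + x]) [0]) (k : Int) 0 =
      (a.take k).sum := by
  have h := prefix_foldl a [] 0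
  simp only [List.nil_append] at h
  rw [h, PySem.List.pyGetD_natCast]
  rw [List.getD_eq_getElem?_getD, List.getElem?_map, List.getElem?_range (by omega : k < a.length + 1)]
  simp

-- Peeling one element off a take-sum.
theorem take_sum_succ (a : List Int) (k : Nat) (hk : k < a.length) :
    (a.take (k + 1)).sum = (a.take k).sum + a.getD k 0 := by
  rw [List.take_add_one, List.sum_append, List.getElem?_eq_getElem hk]
  simp [List.getD_eq_getElem?_getD, List.getElem?_eq_getElem hk]

-- getElem? after A's interior foldl of pySetD over a range of in-bounds indices.
theorem getElem?_foldl_pySetD (g : Int → Int) (lo hi : Int) (init : List Int) (j : Nat)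
    (hlo : 0 ≤ lo) (hhi : hi ≤ (init.length : Int)) :
    ((PySem.List.pyRange lo hi 1).foldl (fun b i => PySem.List.pySetD b i (g i)) init)[j]? =
      if lo ≤ (j : Int) ∧ (j : Int) < hi then some (g j) else init[j]? := by
  by_cases hba : hi ≤ lo
  case pos =>
    rw [PySem.List.pyRange_one_eq_nil hba]
    have : ¬ (lo ≤ (j : Int) ∧ (j : Int) < hi) := by omega
    simp [this]
  case neg =>
    have hba' : lo < hi := by omega
    rw [PySem.List.pyRange_one_cons hba']
    simp only [List.foldl_cons]
    have hlen : (PySem.List.pySetD init lo (g lo)).length = init.length :=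
      PySem.List.length_pySetD init lo (g lo)
    have ih := getElem?_foldl_pySetD g (lo + 1) hi (PySem.List.pySetD init lo (g lo)) j
      (by omega) (by rw [hlen]; exact hhi)
    rw [ih]
    rw [PySem.List.pySetD_of_nonneg init (g lo) hlo, List.getElem?_set]
    by_cases hcase : lo + 1 ≤ (j : Int) ∧ (j : Int) < hi
    · have : lo ≤ (j : Int) ∧ (j : Int) < hi := by omega
      simp [hcase, this]
    · rw [if_neg hcase]
      by_cases heq : lo.toNat = j
      · have hjlo : (j : Int) = lo := by omega
        have hin : lo ≤ (j : Int) ∧ (j : Int) < hi := by omega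
        have hjlt : lo.toNat < init.length := by omega
        rw [if_pos heq, if_pos hjlt, if_pos hin, hjlo]
      · have hout : ¬ (lo ≤ (j : Int) ∧ (j : Int) < hi) := by omega
        rw [if_neg heq, if_neg hout]
termination_by (hi - lo).toNat
decreasing_by omega

-- Python's b[-1] = v on a nonempty buffer sets the last slot.
theorem pySetD_neg_one (xs : List Int) (v : Int) (h : xs ≠ []) :
    PySem.List.pySetD xs (-1) v = xs.set (xs.length - 1) v := by
  have hlen : 1 ≤ xs.length := List.length_pos_iff.mpr h
  simp only [PySem.List.pySetD, PySem.List.pySet?, PySem.List.pyIdx?]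
  rw [if_neg (by omega), if_pos (by omega)]
  simp

theorem pyGetD_nat (xs : List Int) (k : Nat) (d : Int) :
    PySem.List.pyGetD xs (k : Int) d = xs.getD k d := PySem.List.pyGetD_natCast xs k d

-- ===== VERDICT (by name: the statement is the Claim_ definition above) =====
theorem mutateTheArray_spec : Claim_equal_mutateTheArray := by
  intro n a _ hpre
  unfold Spec_mutateTheArray mutateTheArray mutateTheArray_alt
  by_cases hsmall : n < 2
  · rw [if_pos hsmall, if_pos hsmall]
  · rw [if_neg hsmall, if_neg hsmall]
    have hn2 : 2 ≤ n := by omega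
    have hnle : n ≤ (a.length : Int) := by
      rcases hpre with h | ⟨_, h⟩
      · omega
      · exact h
    have hlen2 : 2 ≤ a.length := by omega
    simp only []
    set v0 := PySem.List.pyGetD a 0 0 + PySem.List.pyGetD a 1 0 with hv0
    set v1 := PySem.List.pyGetD a (-2) 0 + PySem.List.pyGetD a (-1) 0 with hv1
    set b0 := List.replicate n.toNat (0 : Int) with hb0
    have hb0len : b0.length = n.toNat := by simp [hb0]
    have hb1 : PySem.List.pySetD b0 0 v0 = b0.set 0 v0 := by
      rw [PySem.List.pySetD_of_nonneg b0 v0 (by omega)]; rfl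
    rw [hb1]
    set b1 := b0.set 0 v0 with hb1d
    have hb1len : b1.length = n.toNat := by simp [hb1d, hb0len]
    have hb1ne : b1 ≠ [] := by
      intro hc; rw [hc] at hb1len; simp at hb1len; omega
    rw [pySetD_neg_one b1 v1 hb1ne]
    set b2 := b1.set (b1.length - 1) v1 with hb2d
    have hb2len : b2.length = n.toNat := by simp [hb2d, hb1len]
    rw [hb2len]
    set p := a.foldl (fun p x => p ++ [PySem.List.pyGetD p (-1) 0 + x]) [0] with hp
    set f := fun i : Int =>
      PySem.List.pyGetD p (i + 2) 0 - PySem.List.pyGetD p (max (i - 1) 0) 0 with hf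
    apply List.ext_getElem?
    intro j
    rw [getElem?_foldl_pySetD _ 1 ((n.toNat : Int) - 1) b2 j (by omega) (by rw [hb2len]; omega)]
    have hrange : PySem.List.pyRange 0 (n - 1) 1 =
        (List.range (n - 1).toNat).map (fun k : Nat => 0 + (k : Int)) := by
      have hnn : n - 1 - 0 = n - 1 := by ring
      rw [PySem.List.pyRange_one, hnn]
    have hmlen : ((PySem.List.pyRange 0 (n - 1) 1).map f).length = (n - 1).toNat := by
      rw [List.length_map, PySem.List.length_pyRange_one]
      congr 1
      ring
    rw [List.getElem?_append]
    by_cases hjlt : j < (n - 1).toNat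
    · -- inside the mapped range: B's value is a difference of prefix sums
      rw [if_pos (show j < ((PySem.List.pyRange 0 (n - 1) 1).map f).length from by
        rw [hmlen]; exact hjlt)]
      rw [hrange, List.map_map, List.getElem?_map, List.getElem?_range hjlt]
      simp only [Option.map_some, Function.comp_apply, hf, zero_add]
      have e2 : (j : Int) + 2 = ((j + 2 : Nat) : Int) := by push_cast; ring
      have em : max ((j : Int) - 1) 0 = ((j - 1 : Nat) : Int) := by omega
      rw [e2, em, p_getD a (j + 2) (by omega), p_getD a (j - 1) (by omega)]
      by_cases hint : 1 ≤ (j : Int) ∧ (j : Int) < (n.toNat : Int) - 1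
      · rw [if_pos hint]
        have hj1 : 1 ≤ j := by omega
        have s1 := take_sum_succ a (j - 1) (by omega)
        have s2 := take_sum_succ a j (by omega)
        have s3 := take_sum_succ a (j + 1) (by omega)
        have ej : j - 1 + 1 = j := by omega
        rw [ej] at s1
        have e1 : ((j : Int) - 1) = ((j - 1 : Nat) : Int) := by omega
        have e3 : ((j : Int) + 1) = ((j + 1 : Nat) : Int) := by push_cast; ring
        rw [e1, e3, pyGetD_nat, pyGetD_nat, pyGetD_nat]
        have : j + 1 + 1 = j + 2 := by omega
        rw [this] at s3
        simp only [Option.some.injEq]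
        omega
      · -- only j = 0 remains inside the range but outside A's interior loop
        have hj0 : j = 0 := by omega
        rw [if_neg hint]
        subst hj0
        rw [hb2d, List.getElem?_set, if_neg (show ¬ b1.length - 1 = 0 by omega)]
        rw [hb1d, List.getElem?_set, if_pos (show (0:Nat) = 0 from rfl),
            if_pos (show 0 < b0.length by omega)]
        have s1 := take_sum_succ a 0 (by omega)
        have s2 := take_sum_succ a 1 (by omega)
        rw [hv0]
        have e0 : (0 : Int) = ((0 : Nat) : Int) := rfl
        have e1 : (1 : Int) = ((1 : Nat) : Int) := rfl
        rw [e0, e1, pyGetD_nat, pyGetD_nat]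
        simp only [Option.some.injEq]
        norm_num at s1 s2 ⊢
        omega
    · by_cases hjlast : j = (n - 1).toNat
      · -- the appended last element vs A's b[-1]
        rw [if_neg (show ¬ j < ((PySem.List.pyRange 0 (n - 1) 1).map f).length from by
          rw [hmlen]; omega)]
        rw [hmlen]
        have hz : j - (n - 1).toNat = 0 := by omega
        rw [hz]
        rw [if_neg (show ¬ (1 ≤ (j : Int) ∧ (j : Int) < (n.toNat : Int) - 1) by omega)]
        rw [hb2d, List.getElem?_set, if_pos (show b1.length - 1 = j by omega),
            if_pos (show b1.length - 1 < b1.length by omega)]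
        rfl
      · -- past the end: both none
        rw [if_neg (show ¬ j < ((PySem.List.pyRange 0 (n - 1) 1).map f).length from by
          rw [hmlen]; omega)]
        rw [if_neg (show ¬ (1 ≤ (j : Int) ∧ (j : Int) < (n.toNat : Int) - 1) by omega)]
        rw [List.getElem?_eq_none_iff.mpr (show b2.length ≤ j by omega)]
        rw [List.getElem?_eq_none_iff.mpr
          (show ([v1] : List Int).length ≤ j - ((PySem.List.pyRange 0 (n-1) 1).map f).length by
            rw [hmlen]; simp only [List.length_cons, List.length_nil]; omega)]
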